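-- pv_equiv track=rewrite | github.com/merledu/oxygen | Temp/stats.py | count_alu_instructions
-- ===== SOURCE A (Python) =====
-- def count_alu_instructions(instruction_string):
--     alu_ops = [
--         "add", "sub", "xor", "sll", "srl", "sra", "slt", "addi", "xori", "ori", "andi",
--         "slli", "srli", "srai", "slti", "sltiu", "sltu", "li", "lui", "mul", "mulh",
--         "auipc", "mulhsu", "mulhu", "div", "divu", "rem", "remu"
--     ]
--     lines = instruction_string.splitlines()
--     alu_instructions = 0
--     for line in lines:
--         stripped_line = line.strip()
--         if any(op in stripped_line for op in alu_ops):
--             alu_instructions += 1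
--     return alu_instructions
-- ===== SOURCE B (Python) =====
-- def count_alu_instructions(instruction_string):
--     # Sliding-window dictionary lookup: instead of searching each op in the line,
--     # test every fixed-length window of the line for membership in a hash set.
--     OPS = frozenset(
--         "add sub xor sll srl sra slt addi xori ori andi "
--         "slli srli srai slti sltiu sltu li lui mul mulh "
--         "auipc mulhsu mulhu div divu rem remu".split()
--     )
--     LENS = (2, 3, 4, 5, 6)  # the distinct op lengths
--     count = 0
--     for line in instruction_string.splitlines():
--         s = line.strip()
--         if any(s[i:i + k] in OPS for i in range(len(s)) for k in LENS):
--             count += 1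
--     return count
-- ===== Notes on version B (the rewrite author's own statement) =====
-- stated objective: alternative
-- what changed: Replaces A's per-line scan over the 28-op list (substring search for each op) by a sliding-window pass over the line: every window of one of the 5 op lengths is looked up in a hash set of the ops, so the op-list loop disappears.
import Mathlib
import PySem

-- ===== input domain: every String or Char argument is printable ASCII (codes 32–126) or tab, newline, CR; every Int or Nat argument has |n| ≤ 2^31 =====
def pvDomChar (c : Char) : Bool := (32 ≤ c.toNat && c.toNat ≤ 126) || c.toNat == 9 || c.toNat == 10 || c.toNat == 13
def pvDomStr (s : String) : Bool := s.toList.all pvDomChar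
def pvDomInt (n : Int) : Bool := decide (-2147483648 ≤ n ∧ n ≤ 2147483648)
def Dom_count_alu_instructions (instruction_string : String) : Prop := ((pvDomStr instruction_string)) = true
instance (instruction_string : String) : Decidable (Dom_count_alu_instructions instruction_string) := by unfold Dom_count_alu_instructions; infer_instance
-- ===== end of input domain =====

-- B replaces A's per-line scan over the 28-op list by a sliding-window pass over the
-- line, looking each fixed-length window up in a set of the ops (alternative algorithm).

-- ===== PORT A =====
def pvAluOps : List String :=
  ["add", "sub", "xor", "sll", "srl", "sra", "slt", "addi", "xori", "ori", "andi",
   "slli", "srli", "srai", "slti", "sltiu", "sltu", "li", "lui", "mul", "mulh",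
   "auipc", "mulhsu", "mulhu", "div", "divu", "rem", "remu"]

def count_alu_instructions (instruction_string : String) : Int :=
  (PySem.Str.splitlines instruction_string).foldl
    (fun acc line =>
      if pvAluOps.any (fun op => PySem.Str.isIn op (PySem.Str.strip line)) then acc + 1 else acc)
    0

-- ===== PORT B =====
-- the op set from Source B: frozenset("… …".split()), held as distinct char lists
def pvOpsB : List (List Char) :=
  (PySem.Str.split₀
    ("add sub xor sll srl sra slt addi xori ori andi " ++
     "slli srli srai slti sltiu sltu li lui mul mulh " ++
     "auipc mulhsu mulhu div divu rem remu")).map String.toList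

def pvLens : List Nat := [2, 3, 4, 5, 6]

def count_alu_instructions_alt (instruction_string : String) : Int :=
  (PySem.Str.splitlines instruction_string).foldl
    (fun count line =>
      let s := (PySem.Str.strip line).toList
      -- s[i:i+k] in OPS, for i in range(len(s)), k in LENS (Python slices clamp, as take does)
      if (List.range s.length).any (fun i =>
            pvLens.any (fun k => pvOpsB.contains ((s.drop i).take k)))
      then count + 1 else count)
    0

-- ===== PRECONDITION & SPEC =====
def Spec_count_alu_instructions (instruction_string : String) (out : Int) : Prop := out = count_alu_instructions_alt instruction_string
instance (instruction_string : String) (out : Int) : Decidable (Spec_count_alu_instructions instruction_string out) := by unfold Spec_count_alu_instructions; infer_instance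

-- ===== CLAIM (what is proved, stated in full; the proofs are below) =====
def Claim_equal_count_alu_instructions : Prop := ∀ (instruction_string : String), Dom_count_alu_instructions instruction_string → Spec_count_alu_instructions instruction_string (count_alu_instructions instruction_string)

-- ===== LEMMAS AND PROOFS =====

-- every op of A's list is nonempty, has its length in pvLens, and is in B's set; and conversely
set_option maxRecDepth 8000 in
lemma ops_ok : ∀ op ∈ pvAluOps,
    op.toList ≠ [] ∧ op.toList.length ∈ pvLens ∧ pvOpsB.contains op.toList = true := by
  decide

set_option maxRecDepth 8000 in
lemma opsB_ok : ∀ w ∈ pvOpsB, ∃ op ∈ pvAluOps, op.toList = w := by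
  decide

-- infix of a list = some window (drop i, take) equals it
lemma infix_iff_window (op t : List Char) (hne : op ≠ []) :
    op <:+: t ↔ ∃ i < t.length, (t.drop i).take op.length = op := by
  constructor
  · rintro ⟨s, u, rfl⟩
    refine ⟨s.length, ?_, ?_⟩
    · have : op.length ≠ 0 := by simpa using congrArg List.length |>.mt (by intro h; exact hne (List.length_eq_zero_iff.mp h))
      simp [List.length_append]
      omega
    · rw [List.append_assoc, List.drop_left, List.take_left]
  · rintro ⟨i, _, hw⟩
    have h1 : op <+: t.drop i := hw ▸ List.take_prefix _ _
    exact h1.isInfix.trans (t.drop_suffix i).isInfix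

-- per-line: A's any-over-ops test equals B's window test
lemma line_eq (s : String) :
    pvAluOps.any (fun op => PySem.Str.isIn op s)
      = (List.range s.toList.length).any (fun i =>
          pvLens.any (fun k => pvOpsB.contains ((s.toList.drop i).take k))) := by
  rw [Bool.eq_iff_iff, List.any_eq_true, List.any_eq_true]
  constructor
  · rintro ⟨op, hop, h⟩
    obtain ⟨hne, hlen, hmem⟩ := ops_ok op hop
    rw [PySem.Str.isIn_iff_infix, infix_iff_window _ _ hne] at h
    obtain ⟨i, hi, hw⟩ := h
    exact ⟨i, List.mem_range.mpr hi, List.any_eq_true.mpr ⟨op.toList.length, hlen, by rw [hw]; exact hmem⟩⟩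
  · rintro ⟨i, hi, h⟩
    rw [List.any_eq_true] at h
    obtain ⟨k, _, hc⟩ := h
    have hmemw : ((s.toList.drop i).take k) ∈ pvOpsB := by simpa using hc
    obtain ⟨op, hop, hopw⟩ := opsB_ok _ hmemw
    refine ⟨op, hop, (PySem.Str.isIn_iff_infix _ _).mpr ?_⟩
    rw [hopw]
    exact (List.take_prefix _ _).isInfix.trans (s.toList.drop_suffix i).isInfix

-- ===== VERDICT (by name: the statement is the Claim_ definition above) =====
theorem count_alu_instructions_spec : Claim_equal_count_alu_instructions := by
  intro s _
  show count_alu_instructions s = count_alu_instructions_alt s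
  unfold count_alu_instructions count_alu_instructions_alt
  refine List.foldl_ext _ _ 0 (fun acc line _ => ?_)
  simp only []
  rw [line_eq (PySem.Str.strip line)]
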